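-- pv_equiv track=rewrite | github.com/ChrisYang249/NYULIMS | backend/app/api/api_v1/endpoints/extraction_plates.py | get_well_position
-- ===== SOURCE A (Python) =====
-- def get_well_position(index: int) -> tuple[str, int]:
--     """Convert index (0-95) to well position (A1-H12)"""
--     # Skip control wells: G11, G12, H11, H12
--     control_wells = ["G11", "G12", "H11", "H12"]
--
--     row = index // 12
--     col = index % 12 + 1
--     well = f"{chr(65 + row)}{col}"
--
--     # If this is a control well, skip to next available
--     if well in control_wells:
--         return get_well_position(index + 1)
--
--     return well, col
-- ===== SOURCE B (Python) =====
-- def get_well_position(index: int) -> tuple[str, int]: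
--     """Convert index (0-95) to well position (A1-H12)"""
--     # The control wells G11, G12, H11, H12 occupy exactly indices 82-83 and
--     # 94-95, so the skip-to-next-available rule is a closed-form index bump.
--     if 82 <= index <= 83:
--         index = 84
--     elif 94 <= index <= 95:
--         index = 96
--     row, rem = divmod(index, 12)
--     col = rem + 1
--     return f"{chr(65 + row)}{col}", col
-- ===== Notes on version B (the rewrite author's own statement) =====
-- stated objective: simpler
-- what changed: Replaces the recursive retry-on-control-well with a closed-form index bump: the four control wells are exactly indices 82-83 and 94-95, so B adjusts the index arithmetically once and computes row/col/well directly, with no recursion and no string membership test.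
-- outside the precondition, e.g. on get_well_position(-781): A raises ValueError, B raises ValueError; on get_well_position(13368564): A raises ValueError, B raises ValueError
import Mathlib
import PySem

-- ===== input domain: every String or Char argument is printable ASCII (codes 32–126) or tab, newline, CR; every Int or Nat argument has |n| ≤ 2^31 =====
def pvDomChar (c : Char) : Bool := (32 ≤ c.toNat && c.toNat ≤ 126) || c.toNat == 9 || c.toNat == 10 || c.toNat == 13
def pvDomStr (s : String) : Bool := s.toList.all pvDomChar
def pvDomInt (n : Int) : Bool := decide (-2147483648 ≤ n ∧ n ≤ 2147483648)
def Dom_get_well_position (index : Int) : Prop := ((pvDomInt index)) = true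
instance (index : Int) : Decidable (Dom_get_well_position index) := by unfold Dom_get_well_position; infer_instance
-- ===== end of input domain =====

-- B replaces A's recursive skip over control wells by a closed-form index bump (simpler, no recursion).


-- ===== PORT A =====
-- chr(n): exact for 0 ≤ n < 0x110000 with n not a UTF-16 surrogate (guaranteed by Pre_)
def pyChr (n : Int) : Char := Char.ofNat n.toNat

-- A's tail recursion, with a fuel guard for totality only: inside Pre_ at most two
-- consecutive control wells exist (82,83 and 94,95), so fuel 4 is never exhausted.
def get_well_position_go : Nat → Int → String × Int
  | fuel, index =>
    let control_wells : List String := ["G11", "G12", "H11", "H12"]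
    let row := PySem.Int.floordiv index 12
    let col := PySem.Int.mod index 12 + 1
    let well := String.ofList (pyChr (65 + row) :: (PySem.Int.toStr col).toList)
    if well ∈ control_wells then
      match fuel with
      | fuel' + 1 => get_well_position_go fuel' (index + 1)
      | 0 => (well, col)
    else (well, col)

def get_well_position (index : Int) : String × Int := get_well_position_go 4 index

-- ===== PORT B =====
def get_well_position_alt (index : Int) : String × Int :=
  -- the control wells G11, G12, H11, H12 occupy exactly indices 82-83 and 94-95
  let index' : Int :=
    if 82 ≤ index ∧ index ≤ 83 then 84
    else if 94 ≤ index ∧ index ≤ 95 then 96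
    else index
  let row := PySem.Int.floordiv index' 12
  let col := PySem.Int.mod index' 12 + 1
  (String.ofList (pyChr (65 + row) :: (PySem.Int.toStr col).toList), col)

-- ===== PRECONDITION & SPEC =====
-- Pre_ excludes the indices on which chr(65 + index//12) raises ValueError (code point
-- outside range(0x110000)) and the indices whose row letter is a lone UTF-16 surrogate
-- (662772 ≤ index ≤ 687347): there both Pythons return the same string, but a lone
-- surrogate is not representable as a Lean Char/String, so the value leaves the type.
def Pre_get_well_position (index : Int) : Prop :=
  -780 ≤ index ∧ index ≤ 13368563 ∧ ¬ (662772 ≤ index ∧ index ≤ 687347)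
instance (index : Int) : Decidable (Pre_get_well_position index) := by
  unfold Pre_get_well_position; infer_instance

def pvWitness_get_well_position : Int := 0

def Spec_get_well_position (index : Int) (out : String × Int) : Prop :=
  out = get_well_position_alt index
instance (index : Int) (out : String × Int) : Decidable (Spec_get_well_position index out) := by
  unfold Spec_get_well_position; infer_instance

-- ===== CLAIM (what is proved, stated in full; the proofs are below) =====
def Claim_equal_get_well_position : Prop :=
  ∀ (index : Int), Dom_get_well_position index → Pre_get_well_position index →
    Spec_get_well_position index (get_well_position index)

-- ===== LEMMAS AND PROOFS =====

-- pyChr of a valid non-surrogate code point equals 'G' or 'H' only at 71 / 72.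
theorem pv_letter (m : Int) (h0 : 0 ≤ m)
    (hv : m < 55296 ∨ 57343 < m ∧ m < 1114112)
    (he : pyChr m = 'G' ∨ pyChr m = 'H') : m = 71 ∨ m = 72 := by
  have hvn : m.toNat.isValidChar := by unfold Nat.isValidChar; omega
  have h2 : (Char.ofNat m.toNat).toNat = 71 ∨ (Char.ofNat m.toNat).toNat = 72 := by
    rcases he with he | he
    · left; rw [show pyChr m = Char.ofNat m.toNat from rfl] at he; rw [he]; decide
    · right; rw [show pyChr m = Char.ofNat m.toNat from rfl] at he; rw [he]; decide
  rw [Char.toNat_ofNat, if_pos hvn] at h2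
  omega

-- str(col) for col in 1..12 reads "11"/"12" only at 11 / 12.
theorem pv_digits (col : Int) (h1 : 1 ≤ col) (h2 : col ≤ 12)
    (hd : (PySem.Int.toStr col).toList = ['1','1'] ∨
          (PySem.Int.toStr col).toList = ['1','2']) : col = 11 ∨ col = 12 := by
  interval_cases col <;> revert hd <;> decide

-- Inside Pre_ and away from indices 82,83,94,95, A's well string is not a control well.
theorem pv_not_control (index : Int)
    (hlb : -780 ≤ index) (hub : index ≤ 13368563)
    (hband : ¬ (662772 ≤ index ∧ index ≤ 687347))
    (h1 : ¬ (82 ≤ index ∧ index ≤ 83)) (h2 : ¬ (94 ≤ index ∧ index ≤ 95)) :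
    String.ofList (pyChr (65 + PySem.Int.floordiv index 12) ::
        (PySem.Int.toStr (PySem.Int.mod index 12 + 1)).toList)
      ∉ (["G11", "G12", "H11", "H12"] : List String) := by
  intro hmem
  have hrec := PySem.Int.floordiv_mul_add_mod index 12
  have hm0 := PySem.Int.mod_nonneg index (show (0:Int) < 12 by omega)
  have hm1 := PySem.Int.mod_lt index (show (0:Int) < 12 by omega)
  have hrlb : (-65 : Int) ≤ PySem.Int.floordiv index 12 := by
    rw [PySem.Int.le_floordiv_iff_mul_le (by omega)]; omega
  have hrub : PySem.Int.floordiv index 12 < 1114047 := by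
    rw [PySem.Int.floordiv_lt_iff_lt_mul (by omega)]; omega
  have hnb : ¬ (55231 ≤ PySem.Int.floordiv index 12 ∧
                PySem.Int.floordiv index 12 ≤ 57278) := by
    intro hb; exact hband (by omega)
  simp only [List.mem_cons, List.not_mem_nil, or_false] at hmem
  have hsplit : (pyChr (65 + PySem.Int.floordiv index 12) = 'G' ∨
                 pyChr (65 + PySem.Int.floordiv index 12) = 'H') ∧
      ((PySem.Int.toStr (PySem.Int.mod index 12 + 1)).toList = ['1','1'] ∨
       (PySem.Int.toStr (PySem.Int.mod index 12 + 1)).toList = ['1','2']) := by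
    rcases hmem with h | h | h | h
    · have h' := congrArg String.toList h
      rw [String.toList_ofList, show ("G11").toList = ['G','1','1'] from by decide] at h'
      injection h' with hc hl
      exact ⟨Or.inl hc, Or.inl hl⟩
    · have h' := congrArg String.toList h
      rw [String.toList_ofList, show ("G12").toList = ['G','1','2'] from by decide] at h'
      injection h' with hc hl
      exact ⟨Or.inl hc, Or.inr hl⟩
    · have h' := congrArg String.toList h
      rw [String.toList_ofList, show ("H11").toList = ['H','1','1'] from by decide] at h'
      injection h' with hc hl
      exact ⟨Or.inr hc, Or.inl hl⟩
    · have h' := congrArg String.toList h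
      rw [String.toList_ofList, show ("H12").toList = ['H','1','2'] from by decide] at h'
      injection h' with hc hl
      exact ⟨Or.inr hc, Or.inr hl⟩
  have hletter := pv_letter (65 + PySem.Int.floordiv index 12) (by omega) (by omega) hsplit.1
  have hdig := pv_digits (PySem.Int.mod index 12 + 1) (by omega) (by omega) hsplit.2
  omega

-- ===== VERDICT (by name: the statement is the Claim_ definition above) =====
theorem get_well_position_spec : Claim_equal_get_well_position := by
  intro index _ hpre
  obtain ⟨hlb, hub, hband⟩ := hpre
  unfold Spec_get_well_position
  by_cases h1 : 82 ≤ index ∧ index ≤ 83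
  · obtain ⟨ha, hb⟩ := h1
    interval_cases index <;> decide
  by_cases h2 : 94 ≤ index ∧ index ≤ 95
  · obtain ⟨ha, hb⟩ := h2
    interval_cases index <;> decide
  have hnc := pv_not_control index hlb hub hband h1 h2
  show get_well_position_go 4 index = _
  rw [get_well_position_go]
  simp only [get_well_position_alt, if_neg hnc, if_neg h1, if_neg h2]
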